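-- pv_equiv track=rewrite | github.com/Zuvix/romanNumbers | 1/RomanConverters.py | check_more_than_three_consecutive_chars
-- ===== SOURCE A (Python) =====
-- roman_dict = {
--     "I": 1,
--     "V": 5,
--     "X": 10,
--     "L": 50,
--     "C": 100,
--     "D": 500,
--     "M": 1000
-- }
--
-- def check_more_than_three_consecutive_chars(romanNumber):
--     key_list = list(roman_dict.keys())
--
--     for x in range(len(key_list)):
--         sum = 0
--         max_sum = 1
--
--         if x % 2 == 0:
--             max_sum = 3
--
--         for element in romanNumber:
--             if element == key_list[x]:
--                 sum += 1
--
--                 if sum > max_sum: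
--                     return False
--             else:
--                 sum = 0
--     return True
-- ===== SOURCE B (Python) =====
-- LIMITS = {"I": 3, "X": 3, "C": 3, "M": 3, "V": 1, "L": 1, "D": 1}
--
-- def check_more_than_three_consecutive_chars(romanNumber):
--     prev = None
--     run = 0
--     for ch in romanNumber:
--         run = run + 1 if ch == prev else 1
--         prev = ch
--         limit = LIMITS.get(ch)
--         if limit is not None and run > limit:
--             return False
--     return True
-- ===== Notes on version B (the rewrite author's own statement) =====
-- stated objective: faster
-- what changed: Replaced A's seven full scans of the string (one per Roman symbol, each tracking its own run counter) by a single pass that tracks the previous character and the current consecutive-run length, checking the run against an allowed-run map.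
import Mathlib
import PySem

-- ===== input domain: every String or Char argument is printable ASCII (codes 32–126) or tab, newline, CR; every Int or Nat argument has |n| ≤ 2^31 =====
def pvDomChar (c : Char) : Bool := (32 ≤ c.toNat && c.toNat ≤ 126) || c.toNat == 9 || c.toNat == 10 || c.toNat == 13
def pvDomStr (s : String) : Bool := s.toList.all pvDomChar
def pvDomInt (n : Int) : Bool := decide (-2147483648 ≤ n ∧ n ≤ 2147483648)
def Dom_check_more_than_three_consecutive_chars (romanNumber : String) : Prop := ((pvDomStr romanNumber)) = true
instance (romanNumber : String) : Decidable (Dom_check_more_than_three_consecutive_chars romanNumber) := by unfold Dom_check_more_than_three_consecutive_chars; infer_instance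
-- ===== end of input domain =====

-- B replaces A's seven full scans (one per Roman symbol) by one single pass with a run counter; measurably faster by a constant factor.

-- ===== PORT A =====
-- keys of roman_dict in insertion order (Python iterates 1-char strings; Char here)
def pvKeyList : List Char := ['I', 'V', 'X', 'L', 'C', 'D', 'M']

-- inner 'for element in romanNumber' loop, state = sum; returns false on the early 'return False'
def pvInnerA (key : Char) (maxSum : Int) : List Char → Int → Bool
  | [], _ => true
  | element :: rest, sum =>
      if element = key then
        let sum := sum + 1
        if sum > maxSum then false else pvInnerA key maxSum rest sum
      else pvInnerA key maxSum rest 0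

-- outer 'for x in range(len(key_list))' loop
def pvOuterA (cs : List Char) : List Int → Bool
  | [] => true
  | x :: xs =>
      let maxSum : Int := if PySem.Int.mod x 2 = 0 then 3 else 1
      match PySem.List.pyGet? pvKeyList x with
      | none => false   -- unreachable: x ∈ range(len(key_list))
      | some k => if pvInnerA k maxSum cs 0 then pvOuterA cs xs else false

def check_more_than_three_consecutive_chars (romanNumber : String) : Bool :=
  pvOuterA romanNumber.toList (PySem.List.pyRange 0 (pvKeyList.length : Int) 1)

-- ===== PORT B =====
def pvLIMITS : PySem.Dict Char Int :=
  PySem.Dict.ofList [('I', 3), ('X', 3), ('C', 3), ('M', 3), ('V', 1), ('L', 1), ('D', 1)]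

def pvLoopB : List Char → Option Char → Int → Bool
  | [], _, _ => true
  | ch :: rest, prev, run =>
      let run := if some ch = prev then run + 1 else 1
      match PySem.Dict.get? pvLIMITS ch with
      | some limit => if run > limit then false else pvLoopB rest (some ch) run
      | none => pvLoopB rest (some ch) run

def check_more_than_three_consecutive_chars_alt (romanNumber : String) : Bool :=
  pvLoopB romanNumber.toList none 0

-- ===== PRECONDITION & SPEC =====
def Spec_check_more_than_three_consecutive_chars (romanNumber : String) (out : Bool) : Prop := out = check_more_than_three_consecutive_chars_alt romanNumber
instance (romanNumber : String) (out : Bool) : Decidable (Spec_check_more_than_three_consecutive_chars romanNumber out) := by unfold Spec_check_more_than_three_consecutive_chars; infer_instance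

-- ===== CLAIM (what is proved, stated in full; the proofs are below) =====
def Claim_equal_check_more_than_three_consecutive_chars : Prop := ∀ (romanNumber : String), Dom_check_more_than_three_consecutive_chars romanNumber → Spec_check_more_than_three_consecutive_chars romanNumber (check_more_than_three_consecutive_chars romanNumber)

-- ===== LEMMAS AND PROOFS =====

-- A's per-key run counter, expressed from B's state (prev, run)
def pvSt (prev : Option Char) (run : Int) (k : Char) : Int :=
  if prev = some k then run else 0

-- the heart: A's seven scans with coherent start states equal B's single pass
theorem pv_main (cs : List Char) : ∀ (prev : Option Char) (run : Int),
    (pvInnerA 'I' 3 cs (pvSt prev run 'I') && pvInnerA 'V' 1 cs (pvSt prev run 'V') &&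
     pvInnerA 'X' 3 cs (pvSt prev run 'X') && pvInnerA 'L' 1 cs (pvSt prev run 'L') &&
     pvInnerA 'C' 3 cs (pvSt prev run 'C') && pvInnerA 'D' 1 cs (pvSt prev run 'D') &&
     pvInnerA 'M' 3 cs (pvSt prev run 'M')) = pvLoopB cs prev run := by
  induction cs with
  | nil => intro prev run; simp [pvInnerA, pvLoopB]
  | cons c cs ih =>
    intro prev run
    by_cases h1 : c = 'I'
    · subst h1
      have hg : PySem.Dict.get? pvLIMITS 'I' = some 3 := by decide
      have hEq := ih (some 'I') (if prev = some 'I' then run + 1 else 1)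
      by_cases hp : prev = some 'I'
      · simp only [hp] at hEq
        simp [pvInnerA, pvLoopB, pvSt, hp, hg] at hEq ⊢
        rw [← hEq]; ac_rfl
      · have hp' : ¬ (some 'I' = prev) := fun h => hp h.symm
        simp only [if_neg hp] at hEq
        simp [pvInnerA, pvLoopB, pvSt, hp, hp', hg] at hEq ⊢
        exact hEq
    by_cases h2 : c = 'V'
    · subst h2
      have hg : PySem.Dict.get? pvLIMITS 'V' = some 1 := by decide
      have hEq := ih (some 'V') (if prev = some 'V' then run + 1 else 1)
      by_cases hp : prev = some 'V'
      · simp only [hp] at hEq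
        simp [pvInnerA, pvLoopB, pvSt, hp, hg] at hEq ⊢
        rw [← hEq]; ac_rfl
      · have hp' : ¬ (some 'V' = prev) := fun h => hp h.symm
        simp only [if_neg hp] at hEq
        simp [pvInnerA, pvLoopB, pvSt, hp, hp', hg] at hEq ⊢
        exact hEq
    by_cases h3 : c = 'X'
    · subst h3
      have hg : PySem.Dict.get? pvLIMITS 'X' = some 3 := by decide
      have hEq := ih (some 'X') (if prev = some 'X' then run + 1 else 1)
      by_cases hp : prev = some 'X'
      · simp only [hp] at hEq
        simp [pvInnerA, pvLoopB, pvSt, hp, hg] at hEq ⊢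
        rw [← hEq]; ac_rfl
      · have hp' : ¬ (some 'X' = prev) := fun h => hp h.symm
        simp only [if_neg hp] at hEq
        simp [pvInnerA, pvLoopB, pvSt, hp, hp', hg] at hEq ⊢
        exact hEq
    by_cases h4 : c = 'L'
    · subst h4
      have hg : PySem.Dict.get? pvLIMITS 'L' = some 1 := by decide
      have hEq := ih (some 'L') (if prev = some 'L' then run + 1 else 1)
      by_cases hp : prev = some 'L'
      · simp only [hp] at hEq
        simp [pvInnerA, pvLoopB, pvSt, hp, hg] at hEq ⊢
        rw [← hEq]; ac_rfl
      · have hp' : ¬ (some 'L' = prev) := fun h => hp h.symm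
        simp only [if_neg hp] at hEq
        simp [pvInnerA, pvLoopB, pvSt, hp, hp', hg] at hEq ⊢
        exact hEq
    by_cases h5 : c = 'C'
    · subst h5
      have hg : PySem.Dict.get? pvLIMITS 'C' = some 3 := by decide
      have hEq := ih (some 'C') (if prev = some 'C' then run + 1 else 1)
      by_cases hp : prev = some 'C'
      · simp only [hp] at hEq
        simp [pvInnerA, pvLoopB, pvSt, hp, hg] at hEq ⊢
        rw [← hEq]; ac_rfl
      · have hp' : ¬ (some 'C' = prev) := fun h => hp h.symm
        simp only [if_neg hp] at hEq
        simp [pvInnerA, pvLoopB, pvSt, hp, hp', hg] at hEq ⊢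
        exact hEq
    by_cases h6 : c = 'D'
    · subst h6
      have hg : PySem.Dict.get? pvLIMITS 'D' = some 1 := by decide
      have hEq := ih (some 'D') (if prev = some 'D' then run + 1 else 1)
      by_cases hp : prev = some 'D'
      · simp only [hp] at hEq
        simp [pvInnerA, pvLoopB, pvSt, hp, hg] at hEq ⊢
        rw [← hEq]; ac_rfl
      · have hp' : ¬ (some 'D' = prev) := fun h => hp h.symm
        simp only [if_neg hp] at hEq
        simp [pvInnerA, pvLoopB, pvSt, hp, hp', hg] at hEq ⊢
        exact hEq
    by_cases h7 : c = 'M'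
    · subst h7
      have hg : PySem.Dict.get? pvLIMITS 'M' = some 3 := by decide
      have hEq := ih (some 'M') (if prev = some 'M' then run + 1 else 1)
      by_cases hp : prev = some 'M'
      · simp only [hp] at hEq
        simp [pvInnerA, pvLoopB, pvSt, hp, hg] at hEq ⊢
        rw [← hEq]; ac_rfl
      · have hp' : ¬ (some 'M' = prev) := fun h => hp h.symm
        simp only [if_neg hp] at hEq
        simp [pvInnerA, pvLoopB, pvSt, hp, hp', hg] at hEq ⊢
        exact hEq
    -- c is not one of the seven Roman symbols: no limit applies
    have hk : pvLIMITS.keys = ['I', 'X', 'C', 'M', 'V', 'L', 'D'] := by decide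
    have hg : PySem.Dict.get? pvLIMITS c = none := by
      rw [PySem.Dict.get?_eq_none_iff_not_mem_keys, hk]
      simp [h1, h2, h3, h4, h5, h6, h7]
    have hEq := ih (some c) (if some c = prev then run + 1 else 1)
    simp [pvSt, h1, h2, h3, h4, h5, h6, h7] at hEq
    simp [pvInnerA, pvLoopB, hg, h1, h2, h3, h4, h5, h6, h7]
    exact hEq

theorem check_more_than_three_consecutive_chars_spec : Claim_equal_check_more_than_three_consecutive_chars := by
  intro s _
  unfold Spec_check_more_than_three_consecutive_chars
  unfold check_more_than_three_consecutive_chars check_more_than_three_consecutive_chars_alt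
  have hr : PySem.List.pyRange 0 ((pvKeyList.length : Nat) : Int) 1 = [0, 1, 2, 3, 4, 5, 6] := by decide
  rw [hr, ← pv_main s.toList none 0]
  simp [pvSt, pvOuterA, pvKeyList, PySem.Int.mod, PySem.List.pyGet?, PySem.List.pyIdx?]
  ac_rfl
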